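-- pv_equiv track=rewrite | github.com/AICardiologist/FoundationRelativity | paper 66/p66_compute_v2.py | quadratic_resolvent
-- ===== SOURCE A (Python) =====
-- import csv, json, math, os, sys
--
-- def factorize(n):
--     n = abs(n)
--     factors = {}
--     d = 2
--     while d * d <= n:
--         while n % d == 0:
--             factors[d] = factors.get(d, 0) + 1
--             n //= d
--         d += 1
--     if n > 1:
--         factors[n] = factors.get(n, 0) + 1
--     return factors
--
-- def divisors(n):
--     n = abs(n)
--     if n == 0: return []
--     divs = []
--     for i in range(1, math.isqrt(n) + 1):
--         if n % i == 0:
--             divs.append(i)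
--             if i != n // i:
--                 divs.append(n // i)
--     return sorted(divs)
--
-- def is_squarefree(n):
--     n = abs(n)
--     if n <= 1: return n == 1
--     for p in range(2, math.isqrt(n) + 1):
--         if n % (p * p) == 0: return False
--     return True
--
-- def _is_fundamental_disc(D):
--     if D <= 0 or D == 1: return False
--     if D % 4 == 1: return is_squarefree(D)
--     if D % 4 == 0:
--         d4 = D // 4
--         if d4 % 4 in [2, 3]: return is_squarefree(d4)
--     return False
--
-- def quadratic_resolvent(disc_F):
--     """
--     For an S₃ cubic of discriminant disc_F, the quadratic resolvent
--     is Q(√disc_F). Decompose disc_F = D_fund * f² where D_fund is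
--     a fundamental discriminant (of the real quadratic field Q(√disc_F)).
--     """
--     # Extract square part: disc_F = m² * d0, d0 squarefree
--     d0 = disc_F
--     m = 1
--     for p, e in factorize(disc_F).items():
--         pairs = e // 2
--         m *= p ** pairs
--         d0 = d0 // (p ** (2 * pairs))
--
--     # Fundamental discriminant of Q(√d0)
--     if d0 % 4 == 1:
--         D_fund = d0
--     else:
--         D_fund = 4 * d0
--
--     # disc_F = D_fund * f_Art² ? Not exactly. disc_F = m² * d0, D_fund relates to d0.
--     # For S₃ cubics: disc_F = D_quad * f_Art² where D_quad = disc(resolvent).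
--     # Since Q(√disc_F) = Q(√d0), D_quad = D_fund = fundamental disc of Q(√d0).
--     # So f_Art² = disc_F / D_fund.
--     if disc_F % D_fund == 0:
--         f_sq = disc_F // D_fund
--         f_art = math.isqrt(f_sq)
--         if f_art * f_art == f_sq:
--             return D_fund, f_art
--
--     # Fallback: brute-force search
--     for d in sorted(divisors(disc_F)):
--         if d < 2: continue
--         rem = disc_F // d
--         f = math.isqrt(rem)
--         if f * f == rem and _is_fundamental_disc(d):
--             return d, f
--
--     return disc_F, 1
-- ===== SOURCE B (Python) =====
-- def quadratic_resolvent(disc_F):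
--     # Extract the square part of disc_F directly: n = m^2 * n' with n' free of
--     # square divisors, via trial division by d*d; then the fundamental-discriminant
--     # decomposition is closed-form: no dict of prime exponents, no divisor search.
--     n = abs(disc_F)
--     m = 1
--     d = 2
--     while d * d <= n:
--         while n % (d * d) == 0:
--             n //= d * d
--             m *= d
--         d += 1
--     d0 = disc_F // (m * m)
--     if d0 % 4 == 1:
--         return d0, m
--     if m % 2 == 0:
--         return 4 * d0, m // 2
--     return disc_F, 1
-- ===== Notes on version B (the rewrite author's own statement) =====
-- stated objective: simpler
-- what changed: B extracts the square part of disc_F by directly dividing out d*d in one trial-division loop and then returns the fundamental-discriminant decomposition by a closed three-branch case split (kernel mod 4 / even square part / neither), eliminating A's prime-exponent dictionary, the divisibility-and-isqrt probe, and the whole sorted-divisors brute-force fallback.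
-- outside the precondition, e.g. on quadratic_resolvent(0): A raises ZeroDivisionError, B returns (0, 1)
import Mathlib
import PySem

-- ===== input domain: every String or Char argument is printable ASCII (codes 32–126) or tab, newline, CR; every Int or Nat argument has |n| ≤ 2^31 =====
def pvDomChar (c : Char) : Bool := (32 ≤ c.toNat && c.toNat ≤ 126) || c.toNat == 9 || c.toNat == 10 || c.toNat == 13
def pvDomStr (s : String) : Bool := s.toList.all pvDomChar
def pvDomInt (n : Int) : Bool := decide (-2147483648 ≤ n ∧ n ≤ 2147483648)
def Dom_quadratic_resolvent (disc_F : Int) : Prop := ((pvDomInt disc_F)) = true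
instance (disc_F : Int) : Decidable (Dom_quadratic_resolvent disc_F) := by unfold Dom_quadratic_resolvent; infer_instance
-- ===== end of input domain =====

-- B extracts the square part by one direct trial-division loop and returns the decomposition by a
-- closed three-branch case split, dropping A's prime-exponent dict, the isqrt probe and the
-- sorted-divisors fallback; equivalence is proved on Pre_ (the inputs where A returns normally).


-- ===== PORT A =====
-- two arithmetic facts cited by the decreasing_by clauses of the loop ports below
theorem pv_one_lt_sq {d : Nat} (h : 2 ≤ d) : 1 < d * d := by nlinarith

theorem pv_measure_lt (n n' d : Nat) (hle : n' ≤ n) (h : d * d ≤ n ∧ 2 ≤ d) :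
    n' + 2 - (d + 1) < n + 2 - d := by
  have h2 : d ≤ d * d := Nat.le_mul_of_pos_left d (by omega)
  omega

-- inner `while n % d == 0` of factorize; the extra `2 ≤ d ∧ 1 ≤ n` conjuncts are totality
-- guards only (they hold at every reachable call: d starts at 2 and only grows, n stays ≥ 1).
def pvFactInner (n d : Nat) (fs : PySem.Dict Nat Nat) : Nat × PySem.Dict Nat Nat :=
  if h : n % d = 0 ∧ 2 ≤ d ∧ 1 ≤ n then
    pvFactInner (n / d) d (fs.insert d (fs.getD d 0 + 1))
  else (n, fs)
termination_by n
decreasing_by exact Nat.div_lt_self h.2.2 h.2.1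

-- needed by pvFactAux's decreasing_by
theorem pvFactInner_fst_le (n d : Nat) (fs : PySem.Dict Nat Nat) : (pvFactInner n d fs).1 ≤ n := by
  fun_induction pvFactInner with
  | case1 n fs hg ih => exact le_trans ih (Nat.div_le_self _ _)
  | case2 n fs hg => exact le_refl n

-- outer `while d * d <= n` of factorize plus the trailing `if n > 1`; `2 ≤ d` is a totality guard.
def pvFactAux (n d : Nat) (fs : PySem.Dict Nat Nat) : PySem.Dict Nat Nat :=
  if h : d * d ≤ n ∧ 2 ≤ d then
    pvFactAux (pvFactInner n d fs).1 (d + 1) (pvFactInner n d fs).2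
  else if 1 < n then fs.insert n (fs.getD n 0 + 1) else fs
termination_by n + 2 - d
decreasing_by exact pv_measure_lt n (pvFactInner n d fs).1 d (pvFactInner_fst_le n d fs) h

-- factorize(n): n = abs(n) → natAbs; keys/exponents are nonnegative ints, kept as Nat (exact)
def pvFactorize (n : Int) : PySem.Dict Nat Nat := pvFactAux n.natAbs 2 (PySem.Dict.mk [])

-- divisors(n); elements are positive ints, kept as Nat (exact); math.isqrt on a Nat is Nat.sqrt
def pvDivisors (n : Int) : List Nat :=
  let na := n.natAbs
  if na = 0 then []
  else
    PySem.List.sorted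
      ((List.range' 1 (Nat.sqrt na)).foldl
        (fun divs i =>
          if na % i = 0 then
            (divs ++ [i]) ++ (if i ≠ na / i then [na / i] else [])
          else divs) [])
      (fun x => x) false

-- is_squarefree(n); the for-loop with early `return False` is the `all` over range(2, isqrt(n)+1)
def pvIsSquarefree (n : Int) : Bool :=
  let na := n.natAbs
  if na ≤ 1 then na == 1
  else (List.range' 2 (Nat.sqrt na - 1)).all (fun p => !(na % (p * p) == 0))

def pvIsFundamentalDisc (D : Int) : Bool :=
  if D ≤ 0 || D == 1 then false
  else if PySem.Int.mod D 4 == 1 then pvIsSquarefree D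
  else if PySem.Int.mod D 4 == 0 then
    (let d4 := PySem.Int.floordiv D 4
     if PySem.Int.mod d4 4 == 2 || PySem.Int.mod d4 4 == 3 then pvIsSquarefree d4 else false)
  else false

-- the final `for d in sorted(divisors(disc_F))` loop with its two `continue`/`return` exits;
-- math.isqrt(rem) raises for rem < 0 in Python — those inputs are excluded by Pre_ below
def pvFallback (discF : Int) : List Nat → Int × Int
  | [] => (discF, 1)
  | d :: rest =>
    if d < 2 then pvFallback discF rest
    else
      let rem := PySem.Int.floordiv discF (d : Int)
      let f : Int := (Nat.sqrt rem.toNat : Int)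
      if f * f == rem && pvIsFundamentalDisc (d : Int) then ((d : Int), f)
      else pvFallback discF rest

def quadratic_resolvent (disc_F : Int) : Int × Int :=
  let dm := (pvFactorize disc_F).items.foldl
      (fun (dm : Int × Int) pe =>
        let pairs := pe.2 / 2
        (PySem.Int.floordiv dm.1 ((pe.1 : Int) ^ (2 * pairs)), dm.2 * (pe.1 : Int) ^ pairs))
      (disc_F, 1)
  let d0 := dm.1
  let m := dm.2
  let Dfund := if PySem.Int.mod d0 4 = 1 then d0 else 4 * d0
  if PySem.Int.mod disc_F Dfund = 0 then
    let fsq := PySem.Int.floordiv disc_F Dfund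
    let f : Int := (Nat.sqrt fsq.toNat : Int)   -- math.isqrt; fsq < 0 raises (outside Pre_)
    if f * f = fsq then (Dfund, f)
    else pvFallback disc_F (PySem.List.sorted (pvDivisors disc_F) (fun x => x) false)
  else pvFallback disc_F (PySem.List.sorted (pvDivisors disc_F) (fun x => x) false)

-- ===== PORT B =====
-- inner `while n % (d*d) == 0`; `2 ≤ d ∧ 1 ≤ n` are totality guards (hold at reachable calls)
def pvExtractInner (n d m : Nat) : Nat × Nat :=
  if h : n % (d * d) = 0 ∧ 2 ≤ d ∧ 1 ≤ n then
    pvExtractInner (n / (d * d)) d (m * d)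
  else (n, m)
termination_by n
decreasing_by exact Nat.div_lt_self h.2.2 (pv_one_lt_sq h.2.1)

theorem pvExtractInner_fst_le (n d m : Nat) : (pvExtractInner n d m).1 ≤ n := by
  fun_induction pvExtractInner with
  | case1 n m hg ih => exact le_trans ih (Nat.div_le_self _ _)
  | case2 n m hg => exact le_refl n

-- outer `while d * d <= n`; `2 ≤ d` is a totality guard
def pvExtractLoop (n d m : Nat) : Nat × Nat :=
  if h : d * d ≤ n ∧ 2 ≤ d then
    pvExtractLoop (pvExtractInner n d m).1 (d + 1) (pvExtractInner n d m).2
  else (n, m)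
termination_by n + 2 - d
decreasing_by exact pv_measure_lt n (pvExtractInner n d m).1 d (pvExtractInner_fst_le n d m) h

-- n and m stay nonnegative throughout Source B, so they are kept as Nat (exact)
def quadratic_resolvent_alt (disc_F : Int) : Int × Int :=
  let nm := pvExtractLoop disc_F.natAbs 2 1
  let m : Int := (nm.2 : Int)
  let d0 := PySem.Int.floordiv disc_F (m * m)
  if PySem.Int.mod d0 4 = 1 then (d0, m)
  else if PySem.Int.mod m 2 = 0 then (4 * d0, PySem.Int.floordiv m 2)
  else (disc_F, 1)

-- ===== PRECONDITION & SPEC =====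
-- pvNegOK disc: disc can be written as s² · t with t ≡ 0 or 1 (mod 4); any such s satisfies
-- s² ≤ |disc|, i.e. s ≤ Nat.sqrt |disc|, so the search range is inherent, not a size cap.
def pvNegOK (n : Int) : Prop :=
  ∃ s ∈ Finset.Icc (1 : Nat) (Nat.sqrt n.natAbs), PySem.Int.mod n ((s : Int) ^ 2) = 0 ∧
    (PySem.Int.mod (n / (s : Int) ^ 2) 4 = 0 ∨ PySem.Int.mod (n / (s : Int) ^ 2) 4 = 1)

-- Pre_ excludes exactly the inputs where A raises: disc_F = 0 (ZeroDivisionError at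
-- `disc_F % D_fund`) and negative disc_F with a nontrivial divisor but no s-squared times
-- (0-or-1 mod 4) factorisation, where the fallback calls math.isqrt of a negative (ValueError).
def Pre_quadratic_resolvent (disc_F : Int) : Prop :=
  0 < disc_F ∨ disc_F = -1 ∨ (disc_F < -1 ∧ pvNegOK disc_F)

instance (disc_F : Int) : Decidable (Pre_quadratic_resolvent disc_F) := by
  unfold Pre_quadratic_resolvent pvNegOK; infer_instance

def pvWitness_quadratic_resolvent : Int := (5)

def Spec_quadratic_resolvent (disc_F : Int) (out : Int × Int) : Prop := out = quadratic_resolvent_alt disc_F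
instance (disc_F : Int) (out : Int × Int) : Decidable (Spec_quadratic_resolvent disc_F out) := by unfold Spec_quadratic_resolvent; infer_instance

-- ===== CLAIM (what is proved, stated in full; the proofs are below) =====
def Claim_equal_quadratic_resolvent : Prop := ∀ (disc_F : Int), Dom_quadratic_resolvent disc_F → Pre_quadratic_resolvent disc_F → Spec_quadratic_resolvent disc_F (quadratic_resolvent disc_F)

-- ===== LEMMAS AND PROOFS =====

-- "no square divisor": x has no divisor e*e with e ≥ 2
def pvNoSq (x : Nat) : Prop := ∀ e, 2 ≤ e → ¬ (e * e ∣ x)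

-- uniqueness of the square part: if a²·b = c²·d with b, d free of square divisors, then a = c
theorem pv_sq_unique (a b c d : Nat) (ha : 1 ≤ a) (hc : 1 ≤ c)
    (hb : pvNoSq b) (hd : pvNoSq d) (h : a * a * b = c * c * d) : a = c := by
  obtain ⟨a', c', hco, ha', hc'⟩ := Nat.exists_coprime a c
  set g := a.gcd c with hg
  have hgpos : 0 < g := Nat.gcd_pos_of_pos_left c ha
  have ha'pos : 0 < a' := by
    rcases Nat.eq_zero_or_pos a' with h0 | h0
    · rw [h0, zero_mul] at ha'; omega
    · exact h0
  have hc'pos : 0 < c' := by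
    rcases Nat.eq_zero_or_pos c' with h0 | h0
    · rw [h0, zero_mul] at hc'; omega
    · exact h0
  have hred : a' * a' * b = c' * c' * d := by
    have : (g * g) * (a' * a' * b) = (g * g) * (c' * c' * d) := by
      calc (g * g) * (a' * a' * b) = a * a * b := by rw [ha']; ring
        _ = c * c * d := h
        _ = (g * g) * (c' * c' * d) := by rw [hc']; ring
    exact Nat.eq_of_mul_eq_mul_left (by positivity) this
  have hc'1 : c' = 1 := by
    by_contra hne
    have h2 : 2 ≤ c' := by omega
    have hdvd : c' * c' ∣ a' * a' * b := ⟨d, by omega⟩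
    have hcop : (c' * c').Coprime (a' * a') :=
      ((hco.symm.mul_right hco.symm).mul_left (hco.symm.mul_right hco.symm))
    exact hb c' h2 (hcop.dvd_of_dvd_mul_left hdvd)
  have ha'1 : a' = 1 := by
    by_contra hne
    have h2 : 2 ≤ a' := by omega
    have hdvd : a' * a' ∣ c' * c' * d := ⟨b, by omega⟩
    have hcop : (a' * a').Coprime (c' * c') :=
      ((hco.mul_right hco).mul_left (hco.mul_right hco))
    exact hd a' h2 (hcop.dvd_of_dvd_mul_left hdvd)
  rw [ha'1, one_mul] at ha'
  rw [hc'1, one_mul] at hc'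
  omega

theorem pv_squarefree_noSq {n : Nat} (h : Squarefree n) : pvNoSq n := by
  intro e he hdvd
  have := Nat.isUnit_iff.mp (h e hdvd)
  omega

-- ===== B-side loop characterisation =====

theorem pvExtractInner_spec (d : Nat) (hd : 2 ≤ d) :
    ∀ n m, 1 ≤ n →
      (pvExtractInner n d m).2 * (pvExtractInner n d m).2 * (pvExtractInner n d m).1 = m * m * n
      ∧ ¬ d * d ∣ (pvExtractInner n d m).1 ∧ (pvExtractInner n d m).1 ∣ n
      ∧ 1 ≤ (pvExtractInner n d m).1 := by
  intro n
  induction n using Nat.strong_induction_on with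
  | _ n ih =>
    intro m hn
    rw [pvExtractInner]
    by_cases hc : n % (d * d) = 0 ∧ 2 ≤ d ∧ 1 ≤ n
    · rw [dif_pos hc]
      have hdd : 1 < d * d := by nlinarith
      have hlt : n / (d * d) < n := Nat.div_lt_self hn hdd
      have hdvd : d * d ∣ n := Nat.dvd_of_mod_eq_zero hc.1
      have hq : 1 ≤ n / (d * d) := (Nat.one_le_div_iff (by omega)).mpr (Nat.le_of_dvd hn hdvd)
      obtain ⟨e1, e2, e3, e4⟩ := ih _ hlt (m * d) hq
      refine ⟨?_, e2, e3.trans (Nat.div_dvd_of_dvd hdvd), e4⟩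
      rw [e1]
      have := Nat.div_mul_cancel hdvd
      calc m * d * (m * d) * (n / (d * d)) = m * m * (n / (d * d) * (d * d)) := by ring
        _ = m * m * n := by rw [this]
    · rw [dif_neg hc]
      have hnd : ¬ d * d ∣ n := fun hdvd =>
        hc ⟨Nat.dvd_iff_mod_eq_zero.mp hdvd, hd, hn⟩
      exact ⟨by ring, hnd, dvd_refl n, hn⟩

theorem pvExtractLoop_spec : ∀ fuel n d m, n + 2 - d ≤ fuel → 2 ≤ d → 1 ≤ n → 1 ≤ m →
    (∀ e, 2 ≤ e → e < d → ¬ e * e ∣ n) →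
    (pvExtractLoop n d m).2 * (pvExtractLoop n d m).2 * (pvExtractLoop n d m).1 = m * m * n
    ∧ pvNoSq (pvExtractLoop n d m).1 ∧ 1 ≤ (pvExtractLoop n d m).2
    ∧ 1 ≤ (pvExtractLoop n d m).1 := by
  intro fuel
  induction fuel with
  | zero =>
    intro n d m hfuel hd hn hm hinv
    have hdd : d ≤ d * d := Nat.le_mul_of_pos_left d (by omega)
    rw [pvExtractLoop, dif_neg (by omega)]
    refine ⟨by ring, ?_, hm, hn⟩
    intro e he hdvd
    have := Nat.le_of_dvd hn hdvd
    have : 2 * e ≤ e * e := by nlinarith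
    exact hinv e he (by omega) hdvd
  | succ k ihf =>
    intro n d m hfuel hd hn hm hinv
    rw [pvExtractLoop]
    by_cases hc : d * d ≤ n ∧ 2 ≤ d
    · rw [dif_pos hc]
      obtain ⟨e1, e2, e3, e4⟩ := pvExtractInner_spec d hd n m hn
      set n' := (pvExtractInner n d m).1 with hn'
      set m' := (pvExtractInner n d m).2 with hm'
      have hmpos : 1 ≤ m' := by
        rcases Nat.eq_zero_or_pos m' with h0 | h0
        · exfalso; rw [h0] at e1; simp at e1; omega
        · exact h0
      have hle : n' ≤ n := pvExtractInner_fst_le n d m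
      have hdn : d ≤ n := le_trans (Nat.le_mul_of_pos_left d (by omega)) hc.1
      have hinv' : ∀ e, 2 ≤ e → e < d + 1 → ¬ e * e ∣ n' := by
        intro e he helt hdvd
        rcases Nat.lt_or_ge e d with hlt | hge
        · exact hinv e he hlt (hdvd.trans e3)
        · have : e = d := by omega
          rw [this] at hdvd; exact e2 hdvd
      obtain ⟨f1, f2, f3, f4⟩ := ihf n' (d + 1) m' (by omega) (by omega) e4 hmpos hinv'
      exact ⟨by rw [f1, e1], f2, f3, f4⟩
    · rw [dif_neg hc]
      have hlt : n < d * d := by omega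
      refine ⟨by ring, ?_, hm, hn⟩
      intro e he hdvd
      rcases Nat.lt_or_ge e d with h | h
      · exact hinv e he h hdvd
      · have : d * d ≤ e * e := Nat.mul_le_mul h h
        have := Nat.le_of_dvd hn hdvd
        omega

-- ===== A-side: dict plumbing =====

theorem pvDict_getD_fresh (l : List (Nat × Nat)) (d : Nat) (h : ∀ pe ∈ l, pe.1 ≠ d) :
    (PySem.Dict.mk l).getD d 0 = 0 := by
  have : List.find? (fun p => p.1 == d) l = none := by
    rw [List.find?_eq_none]
    intro x hx
    simpa using h x hx
  simp [PySem.Dict.getD, PySem.Dict.get?, this]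

theorem pvDict_insert_fresh (l : List (Nat × Nat)) (d v : Nat) (h : ∀ pe ∈ l, pe.1 ≠ d) :
    (PySem.Dict.mk l).insert d v = PySem.Dict.mk (l ++ [(d, v)]) := by
  have hcon : (PySem.Dict.mk l).contains d = false := by
    simp only [PySem.Dict.contains, List.any_eq_false]
    intro x hx
    simpa using h x hx
  simp [PySem.Dict.insert, hcon]

theorem pvDict_getD_last (l : List (Nat × Nat)) (d c : Nat) (h : ∀ pe ∈ l, pe.1 ≠ d) :
    (PySem.Dict.mk (l ++ [(d, c)])).getD d 0 = c := by
  have h1 : List.find? (fun p => p.1 == d) l = none := by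
    rw [List.find?_eq_none]
    intro x hx
    simpa using h x hx
  simp [PySem.Dict.getD, PySem.Dict.get?, List.find?_append, h1]

theorem pvDict_insert_last (l : List (Nat × Nat)) (d c v : Nat) (h : ∀ pe ∈ l, pe.1 ≠ d) :
    (PySem.Dict.mk (l ++ [(d, c)])).insert d v = PySem.Dict.mk (l ++ [(d, v)]) := by
  have hcon : (PySem.Dict.mk (l ++ [(d, c)])).contains d = true := by
    simp [PySem.Dict.contains]
  simp only [PySem.Dict.insert, hcon, if_pos]
  congr 1
  rw [List.map_append]
  congr 1
  · have hid : ∀ p ∈ l, (if (p.1 == d) = true then ((d, v) : Nat × Nat) else p) = p := by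
      intro p hp
      rw [if_neg (by simpa using h p hp)]
    rw [List.map_congr_left hid]
    exact List.map_id l
  · simp

-- factorize inner loop when d does not divide n: nothing happens
theorem pvFactInner_not_dvd (n d : Nat) (fs : PySem.Dict Nat Nat) (h : ¬ d ∣ n) :
    pvFactInner n d fs = (n, fs) := by
  rw [pvFactInner, dif_neg]
  intro hc
  exact h (Nat.dvd_of_mod_eq_zero hc.1)

theorem pvFactInner_go (d : Nat) (hd : 2 ≤ d) (l : List (Nat × Nat))
    (hfresh : ∀ pe ∈ l, pe.1 ≠ d) :
    ∀ n, 1 ≤ n → ∀ k, ∃ c n',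
      pvFactInner n d (PySem.Dict.mk (l ++ [(d, k)])) = (n', PySem.Dict.mk (l ++ [(d, k + c)]))
      ∧ n' * d ^ c = n ∧ ¬ d ∣ n' ∧ 1 ≤ n' := by
  intro n
  induction n using Nat.strong_induction_on with
  | _ n ih =>
    intro hn k
    by_cases hdvd : d ∣ n
    · rw [pvFactInner, dif_pos ⟨Nat.dvd_iff_mod_eq_zero.mp hdvd, hd, hn⟩]
      rw [pvDict_getD_last l d k hfresh, pvDict_insert_last l d k (k + 1) hfresh]
      have hlt : n / d < n := Nat.div_lt_self hn (by omega)
      have hq : 1 ≤ n / d := (Nat.one_le_div_iff (by omega)).mpr (Nat.le_of_dvd hn hdvd)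
      obtain ⟨c, n', hrec, hmul, hnd, hn'⟩ := ih _ hlt hq (k + 1)
      refine ⟨c + 1, n', ?_, ?_, hnd, hn'⟩
      · rw [hrec, show k + 1 + c = k + (c + 1) from by omega]
      · rw [pow_succ]
        calc n' * (d ^ c * d) = (n' * d ^ c) * d := by ring
          _ = (n / d) * d := by rw [hmul]
          _ = n := Nat.div_mul_cancel hdvd
    · rw [pvFactInner_not_dvd n d _ hdvd]
      exact ⟨0, n, by simp, by simp, hdvd, hn⟩

theorem pvFactInner_dvd (d : Nat) (hd : 2 ≤ d) (l : List (Nat × Nat))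
    (hfresh : ∀ pe ∈ l, pe.1 ≠ d) (n : Nat) (hn : 1 ≤ n) (hdvd : d ∣ n) :
    ∃ c n', pvFactInner n d (PySem.Dict.mk l) = (n', PySem.Dict.mk (l ++ [(d, c)]))
      ∧ 1 ≤ c ∧ n' * d ^ c = n ∧ ¬ d ∣ n' ∧ 1 ≤ n' := by
  rw [pvFactInner, dif_pos ⟨Nat.dvd_iff_mod_eq_zero.mp hdvd, hd, hn⟩]
  rw [pvDict_getD_fresh l d hfresh, pvDict_insert_fresh l d 1 hfresh]
  have hlt : n / d < n := Nat.div_lt_self hn (by omega)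
  have hq : 1 ≤ n / d := (Nat.one_le_div_iff (by omega)).mpr (Nat.le_of_dvd hn hdvd)
  obtain ⟨c, n', hrec, hmul, hnd, hn'⟩ := pvFactInner_go d hd l hfresh (n / d) hq 1
  refine ⟨1 + c, n', hrec, by omega, ?_, hnd, hn'⟩
  rw [pow_add, pow_one]
  calc n' * (d * d ^ c) = (n' * d ^ c) * d := by ring
    _ = (n / d) * d := by rw [hmul]
    _ = n := Nat.div_mul_cancel hdvd

-- ===== A-side: trial division produces the prime factorisation =====

def pvPE (l : List (Nat × Nat)) : Nat := (l.map (fun pe => pe.1 ^ pe.2)).prod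
def pvRem (l : List (Nat × Nat)) : Nat := (l.map (fun pe => pe.1 ^ (pe.2 % 2))).prod
def pvHalf (l : List (Nat × Nat)) : Nat := (l.map (fun pe => pe.1 ^ (pe.2 / 2))).prod

theorem pvPE_cons (p e : Nat) (L : List (Nat × Nat)) : pvPE ((p, e) :: L) = p ^ e * pvPE L := by
  simp [pvPE]

theorem pvRem_cons (p e : Nat) (L : List (Nat × Nat)) :
    pvRem ((p, e) :: L) = p ^ (e % 2) * pvRem L := by
  simp [pvRem]

theorem pvHalf_cons (p e : Nat) (L : List (Nat × Nat)) :
    pvHalf ((p, e) :: L) = p ^ (e / 2) * pvHalf L := by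
  simp [pvHalf]

theorem pv_prime_of_dvd (d n : Nat) (hd : 2 ≤ d) (hdvd : d ∣ n) (hn : 1 ≤ n)
    (hinv : ∀ q, 2 ≤ q → q < d → ¬ q ∣ n) : Nat.Prime d := by
  have hp : Nat.Prime d.minFac := Nat.minFac_prime (by omega)
  have h1 : d.minFac ∣ n := (Nat.minFac_dvd d).trans hdvd
  have h2 : d ≤ d.minFac := by
    by_contra hlt
    exact hinv d.minFac hp.two_le (by omega) h1
  have h3 : d.minFac ≤ d := Nat.minFac_le (by omega)
  have : d.minFac = d := by omega
  rwa [← this]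

theorem pv_prime_of_small (n d : Nat) (hn : 2 ≤ n) (hd : 2 ≤ d) (hlt : n < d * d)
    (hinv : ∀ q, 2 ≤ q → q < d → ¬ q ∣ n) : Nat.Prime n := by
  have hp : Nat.Prime n.minFac := Nat.minFac_prime (by omega)
  have h1 : n.minFac ∣ n := Nat.minFac_dvd n
  have hge : d ≤ n.minFac := by
    by_contra hlt2
    exact hinv n.minFac hp.two_le (by omega) h1
  have hq : n / n.minFac ∣ n := Nat.div_dvd_of_dvd h1
  have hqlt : n / n.minFac < d := by
    have h2 : n / n.minFac ≤ n / d := Nat.div_le_div_left hge (by omega)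
    have h3 : n / d < d := (Nat.div_lt_iff_lt_mul (by omega)).mpr hlt
    omega
  have hq1 : n / n.minFac = 1 := by
    by_contra hne
    rcases Nat.eq_zero_or_pos (n / n.minFac) with h0 | h0
    · rw [Nat.div_eq_zero_iff] at h0
      have := Nat.minFac_le (show 0 < n by omega)
      omega
    · exact hinv (n / n.minFac) (by omega) hqlt hq
  have : n.minFac = n := by
    have := Nat.div_mul_cancel h1
    rw [hq1] at this
    omega
  rwa [← this]

theorem pvFactAux_spec : ∀ fuel n d l, n + 2 - d ≤ fuel → 2 ≤ d → 1 ≤ n →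
    (∀ pe ∈ l, 2 ≤ pe.1 ∧ pe.1 < d) → (∀ q, 2 ≤ q → q < d → ¬ q ∣ n) →
    ∃ L, pvFactAux n d (PySem.Dict.mk l) = PySem.Dict.mk (l ++ L)
      ∧ pvPE L = n
      ∧ (∀ pe ∈ L, Nat.Prime pe.1 ∧ 1 ≤ pe.2 ∧ d ≤ pe.1)
      ∧ (L.map Prod.fst).Pairwise (· < ·) := by
  intro fuel
  induction fuel with
  | zero =>
    intro n d l hfuel hd hn hkeys hinv
    have hdd : d ≤ d * d := Nat.le_mul_of_pos_left d (by omega)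
    rw [pvFactAux, dif_neg (by omega)]
    by_cases h1 : 1 < n
    · exact absurd (dvd_refl n) (hinv n (by omega) (by omega))
    · rw [if_neg h1]
      refine ⟨[], by simp, ?_, by simp, by simp⟩
      simp only [pvPE, List.map_nil, List.prod_nil]
      omega
  | succ k ihf =>
    intro n d l hfuel hd hn hkeys hinv
    rw [pvFactAux]
    by_cases hc : d * d ≤ n ∧ 2 ≤ d
    · rw [dif_pos hc]
      have hdn : d ≤ n := le_trans (Nat.le_mul_of_pos_left d (by omega)) hc.1
      have hfresh : ∀ pe ∈ l, pe.1 ≠ d := fun pe hpe => by have := hkeys pe hpe; omega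
      by_cases hdvd : d ∣ n
      · obtain ⟨c, n', heq, hc1, hmul, hnd, hn'⟩ := pvFactInner_dvd d hd l hfresh n hn hdvd
        rw [heq]
        have hn'dvd : n' ∣ n := ⟨d ^ c, hmul.symm⟩
        have hkeys' : ∀ pe ∈ l ++ [(d, c)], 2 ≤ pe.1 ∧ pe.1 < d + 1 := by
          intro pe hpe
          rcases List.mem_append.mp hpe with hpe | hpe
          · have := hkeys pe hpe; omega
          · simp only [List.mem_singleton] at hpe
            subst hpe; omega
        have hinv' : ∀ q, 2 ≤ q → q < d + 1 → ¬ q ∣ n' := by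
          intro q h2 hq hqdvd
          rcases Nat.lt_or_ge q d with hlt | hge
          · exact hinv q h2 hlt (hqdvd.trans hn'dvd)
          · have : q = d := by omega
            subst this; exact hnd hqdvd
        have hle : n' ≤ n := Nat.le_of_dvd hn hn'dvd
        obtain ⟨L', hLeq, hLpe, hLprops, hLpair⟩ :=
          ihf n' (d + 1) (l ++ [(d, c)]) (by omega) (by omega) hn' hkeys' hinv'
        refine ⟨(d, c) :: L', ?_, ?_, ?_, ?_⟩
        · rw [hLeq]; congr 1; simp
        · rw [pvPE_cons, hLpe, Nat.mul_comm]; exact hmul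
        · intro pe hpe
          rcases List.mem_cons.mp hpe with rfl | hpe
          · exact ⟨pv_prime_of_dvd d n hd hdvd hn hinv, hc1, le_refl d⟩
          · have := hLprops pe hpe
            exact ⟨this.1, this.2.1, by omega⟩
        · simp only [List.map_cons, List.pairwise_cons]
          refine ⟨?_, hLpair⟩
          intro b hb
          simp only [List.mem_map] at hb
          obtain ⟨pe, hpe, rfl⟩ := hb
          have := (hLprops pe hpe).2.2
          omega
      · rw [pvFactInner_not_dvd n d _ hdvd]
        have hinv' : ∀ q, 2 ≤ q → q < d + 1 → ¬ q ∣ n := by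
          intro q h2 hq hqdvd
          rcases Nat.lt_or_ge q d with hlt | hge
          · exact hinv q h2 hlt hqdvd
          · have : q = d := by omega
            subst this; exact hdvd hqdvd
        obtain ⟨L', hLeq, hLpe, hLprops, hLpair⟩ :=
          ihf n (d + 1) l (by omega) (by omega) hn
            (fun pe hpe => by have := hkeys pe hpe; omega) hinv'
        refine ⟨L', hLeq, hLpe, ?_, hLpair⟩
        intro pe hpe
        have := hLprops pe hpe
        exact ⟨this.1, this.2.1, by omega⟩
    · rw [dif_neg hc]
      have hlt : n < d * d := by
        rcases Nat.lt_or_ge n (d * d) with h | h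
        · exact h
        · exact absurd ⟨h, hd⟩ hc
      by_cases h1 : 1 < n
      · rw [if_pos h1]
        have hfreshn : ∀ pe ∈ l, pe.1 ≠ n := by
          intro pe hpe he
          exact hinv pe.1 (hkeys pe hpe).1 (hkeys pe hpe).2 (he ▸ dvd_refl pe.1)
        rw [pvDict_getD_fresh l n hfreshn, pvDict_insert_fresh l n 1 hfreshn]
        have hdn : d ≤ n := by
          rcases Nat.lt_or_ge n d with h | h
          · exact absurd (dvd_refl n) (hinv n (by omega) h)
          · exact h
        refine ⟨[(n, 1)], rfl, by simp [pvPE], ?_, by simp⟩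
        intro pe hpe
        simp only [List.mem_singleton] at hpe
        subst hpe
        exact ⟨pv_prime_of_small n d (by omega) hd hlt hinv, by omega, hdn⟩
      · rw [if_neg h1]
        refine ⟨[], by simp, ?_, by simp, by simp⟩
        simp only [pvPE, List.map_nil, List.prod_nil]
        omega

-- ===== the items-fold of A's main function =====

theorem pvFold_spec : ∀ (L : List (Nat × Nat)) (t m0 : Int), (∀ pe ∈ L, 1 ≤ pe.1) →
    L.foldl (fun (dm : Int × Int) pe =>
        let pairs := pe.2 / 2
        (PySem.Int.floordiv dm.1 ((pe.1 : Int) ^ (2 * pairs)), dm.2 * (pe.1 : Int) ^ pairs))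
      (t * (pvPE L : Int), m0)
      = (t * (pvRem L : Int), m0 * (pvHalf L : Int)) := by
  intro L
  induction L with
  | nil => intro t m0 _; simp [pvPE, pvRem, pvHalf]
  | cons pe L' ih =>
    intro t m0 hpos
    obtain ⟨p, e⟩ := pe
    have hp : (1 : Nat) ≤ p := (hpos (p, e) (by simp))
    have hsplit : t * (pvPE ((p, e) :: L') : Int)
        = ((p : Int) ^ (2 * (e / 2))) * ((t * (p : Int) ^ (e % 2)) * (pvPE L' : Int)) := by
      rw [pvPE_cons]
      have he : e = 2 * (e / 2) + e % 2 := by omega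
      calc t * ((p ^ e * pvPE L' : Nat) : Int)
          = t * ((p : Int) ^ (2 * (e / 2) + e % 2) * (pvPE L' : Int)) := by push_cast; rw [← he]
        _ = ((p : Int) ^ (2 * (e / 2))) * ((t * (p : Int) ^ (e % 2)) * (pvPE L' : Int)) := by
            rw [pow_add]; ring
    simp only [List.foldl_cons]
    have hpow : ((p : Int) ^ (2 * (e / 2))) ≠ 0 := by positivity
    have hdiv : PySem.Int.floordiv (t * (pvPE ((p, e) :: L') : Int)) ((p : Int) ^ (2 * (e / 2)))
        = (t * (p : Int) ^ (e % 2)) * (pvPE L' : Int) := by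
      rw [hsplit]
      simp only [PySem.Int.floordiv]
      exact Int.mul_fdiv_cancel_left _ hpow
    rw [hdiv]
    have := ih (t * (p : Int) ^ (e % 2)) (m0 * (p : Int) ^ (e / 2))
      (fun x hx => hpos x (by simp [hx]))
    rw [this, pvRem_cons, pvHalf_cons, Prod.mk.injEq]
    constructor <;> (push_cast; ring)

theorem pvPE_eq (L : List (Nat × Nat)) : pvPE L = pvHalf L * pvHalf L * pvRem L := by
  induction L with
  | nil => simp [pvPE, pvRem, pvHalf]
  | cons pe L' ih =>
    obtain ⟨p, e⟩ := pe
    simp only [pvPE, pvRem, pvHalf, List.map_cons, List.prod_cons] at *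
    have he : e = e / 2 + e / 2 + e % 2 := by omega
    calc p ^ e * (L'.map (fun pe => pe.1 ^ pe.2)).prod
        = p ^ (e / 2 + e / 2 + e % 2) * (L'.map (fun pe => pe.1 ^ pe.2)).prod := by rw [← he]
      _ = _ := by rw [ih, pow_add, pow_add]; ring

theorem pvHalf_pos (L : List (Nat × Nat)) (h : ∀ pe ∈ L, Nat.Prime pe.1) : 0 < pvHalf L := by
  apply List.prod_pos
  intro a ha
  simp only [List.mem_map] at ha
  obtain ⟨pe, hpe, rfl⟩ := ha
  exact pow_pos (h pe hpe).pos _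

theorem pvRem_pos (L : List (Nat × Nat)) (h : ∀ pe ∈ L, Nat.Prime pe.1) : 0 < pvRem L := by
  apply List.prod_pos
  intro a ha
  simp only [List.mem_map] at ha
  obtain ⟨pe, hpe, rfl⟩ := ha
  exact pow_pos (h pe hpe).pos _

theorem pv_prime_not_dvd_rem (p : Nat) (hp : Nat.Prime p) :
    ∀ L, (∀ pe ∈ L, Nat.Prime pe.1 ∧ pe.1 ≠ p) → ¬ p ∣ pvRem L := by
  intro L
  induction L with
  | nil =>
    intro _ hdvd
    simp only [pvRem, List.map_nil, List.prod_nil] at hdvd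
    have h1 := Nat.le_of_dvd one_pos hdvd
    have := hp.two_le
    omega
  | cons pe L' ih =>
    intro hL hdvd
    obtain ⟨q, e⟩ := pe
    obtain ⟨hq, hne⟩ := hL (q, e) (by simp)
    simp only [pvRem, List.map_cons, List.prod_cons] at hdvd
    rcases (Nat.Prime.dvd_mul hp).mp hdvd with h | h
    · have := hp.dvd_of_dvd_pow h
      have := (Nat.prime_dvd_prime_iff_eq hp hq).mp this
      exact hne this.symm
    · exact ih (fun x hx => hL x (by simp [hx])) h

theorem pvRem_noSq (L : List (Nat × Nat)) (hL : ∀ pe ∈ L, Nat.Prime pe.1)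
    (hchain : (L.map Prod.fst).Pairwise (· < ·)) : pvNoSq (pvRem L) := by
  have main : ∀ q, Nat.Prime q → ¬ q * q ∣ pvRem L := by
    induction L with
    | nil =>
      intro q hq hdvd
      simp only [pvRem, List.map_nil, List.prod_nil] at hdvd
      have h1 := Nat.le_of_dvd one_pos hdvd
      nlinarith [hq.two_le]
    | cons pe L' ih =>
      intro q hq hdvd
      obtain ⟨p, e⟩ := pe
      have hp : Nat.Prime p := hL (p, e) (by simp)
      have hL' : ∀ x ∈ L', Nat.Prime x.1 := fun x hx => hL x (by simp [hx])
      have hchain' : (L'.map Prod.fst).Pairwise (· < ·) := by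
        simp only [List.map_cons] at hchain
        exact hchain.tail
      have hlt : ∀ x ∈ L', p < x.1 := by
        intro x hx
        simp only [List.map_cons, List.pairwise_cons] at hchain
        exact hchain.1 x.1 (List.mem_map_of_mem hx)
      have hnd : ¬ p ∣ pvRem L' :=
        pv_prime_not_dvd_rem p hp L' (fun x hx => ⟨hL' x hx, by have := hlt x hx; omega⟩)
      simp only [pvRem, List.map_cons, List.prod_cons] at hdvd
      by_cases hqp : q = p
      · subst hqp
        rcases Nat.lt_or_ge 1 (e % 2) with h | h
        · omega
        · interval_cases he : e % 2
          · simp only [pow_zero, one_mul] at hdvd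
            exact hnd (dvd_trans (dvd_mul_left q q) hdvd)
          · simp only [pow_one] at hdvd
            have : q ∣ pvRem L' := by
              have := (mul_dvd_mul_iff_left (show q ≠ 0 by have := hq.two_le; omega)).mp hdvd
              exact this
            exact hnd this
      · have hcop : (q * q).Coprime (p ^ (e % 2)) := by
          have h1 : q.Coprime p := (Nat.coprime_primes hq hp).mpr hqp
          exact (h1.mul_left h1).pow_right _
        have : q * q ∣ pvRem L' := hcop.dvd_of_dvd_mul_left hdvd
        exact ih hL' hchain' q hq this
  intro e he hdvd
  obtain ⟨q, hq, hqe⟩ := Nat.exists_prime_and_dvd (show e ≠ 1 by omega)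
  exact main q hq (dvd_trans (Nat.mul_dvd_mul hqe hqe) hdvd)

-- ===== squarefree test, divisors, fallback =====

theorem pvIsSquarefree_noSq (x : Int) (h : pvIsSquarefree x = true) : pvNoSq x.natAbs := by
  unfold pvIsSquarefree at h
  by_cases hle : x.natAbs ≤ 1
  · rw [if_pos hle] at h
    have : x.natAbs = 1 := by simpa using h
    intro e he hdvd
    rw [this] at hdvd
    have := Nat.le_of_dvd (by omega) hdvd
    nlinarith
  · rw [if_neg hle] at h
    rw [List.all_eq_true] at h
    intro e he hdvd
    have hna : 2 ≤ x.natAbs := by omega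
    have h1 : e * e ≤ x.natAbs := Nat.le_of_dvd (by omega) hdvd
    have h2 : e ≤ Nat.sqrt x.natAbs := Nat.le_sqrt.mpr h1
    have hsq1 : 1 ≤ Nat.sqrt x.natAbs := by
      have : 1 * 1 ≤ x.natAbs := by omega
      exact Nat.le_sqrt.mpr this
    have hmem : e ∈ List.range' 2 (Nat.sqrt x.natAbs - 1) := by
      rw [List.mem_range'_1]
      exact ⟨by omega, by omega⟩
    have := h e hmem
    simp only [Bool.not_eq_eq_eq_not, Bool.not_true, beq_eq_false_iff_ne] at this
    exact this (Nat.dvd_iff_mod_eq_zero.mp hdvd)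

theorem pv_mem_divisors (x : Int) (a : Nat) (ha : a ∈ pvDivisors x) : a ∣ x.natAbs := by
  unfold pvDivisors at ha
  by_cases h0 : x.natAbs = 0
  · simp [h0] at ha
  · rw [if_neg h0] at ha
    rw [PySem.List.mem_sorted] at ha
    suffices hgen : ∀ (l : List Nat) (acc : List Nat), (∀ b ∈ acc, b ∣ x.natAbs) →
        a ∈ l.foldl (fun divs i =>
          if x.natAbs % i = 0 then (divs ++ [i]) ++ (if i ≠ x.natAbs / i then [x.natAbs / i] else [])
          else divs) acc → a ∣ x.natAbs by
      exact hgen _ [] (by simp) ha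
    intro l
    induction l with
    | nil => intro acc hacc hmem; exact hacc a hmem
    | cons i l' ih =>
      intro acc hacc hmem
      simp only [List.foldl_cons] at hmem
      by_cases hc : x.natAbs % i = 0
      · rw [if_pos hc] at hmem
        refine ih _ ?_ hmem
        intro b hb
        simp only [List.mem_append, List.mem_singleton] at hb
        rcases hb with (hb | rfl) | hb
        · exact hacc b hb
        · exact Nat.dvd_of_mod_eq_zero hc
        · split at hb
          · simp only [List.mem_singleton] at hb
            subst hb
            exact Nat.div_dvd_of_dvd (Nat.dvd_of_mod_eq_zero hc)
          · simp at hb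
      · rw [if_neg hc] at hmem
        exact ih _ hacc hmem

theorem pvFallback_all_fail (x : Int) : ∀ l : List Nat,
    (∀ a ∈ l, ¬ a < 2 →
      (((Nat.sqrt (PySem.Int.floordiv x (a : Int)).toNat : Int)
          * (Nat.sqrt (PySem.Int.floordiv x (a : Int)).toNat : Int) == PySem.Int.floordiv x (a : Int))
        && pvIsFundamentalDisc (a : Int)) = false) →
    pvFallback x l = (x, 1) := by
  intro l
  induction l with
  | nil => intro _; rfl
  | cons a l' ih =>
    intro h
    rw [pvFallback]
    by_cases hlt : a < 2
    · rw [if_pos hlt]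
      exact ih (fun b hb => h b (by simp [hb]))
    · rw [if_neg hlt]
      simp only [h a (List.mem_cons_self) hlt, Bool.false_eq_true, if_false]
      exact ih (fun b hb => h b (by simp [hb]))

-- ===== fundamental-disc test, the negOK witness, and the main equivalence =====

theorem pvIsFundamentalDisc_cases (a : Nat) (h2 : 2 ≤ a)
    (h : pvIsFundamentalDisc (a : Int) = true) :
    (a % 4 = 1 ∧ pvNoSq a) ∨ (a % 4 = 0 ∧ pvNoSq (a / 4)) := by
  unfold pvIsFundamentalDisc at h
  rw [if_neg (by simp; omega)] at h
  have hmod4 : PySem.Int.mod (a : Int) 4 = ((a % 4 : Nat) : Int) := by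
    exact_mod_cast PySem.Int.mod_natCast a 4
  rw [hmod4] at h
  by_cases h41 : a % 4 = 1
  · rw [if_pos (by simp [h41])] at h
    left
    refine ⟨h41, ?_⟩
    have := pvIsSquarefree_noSq (a : Int) h
    rwa [Int.natAbs_natCast] at this
  · rw [if_neg (by simp; omega)] at h
    by_cases h40 : a % 4 = 0
    · rw [if_pos (by simp [h40])] at h
      right
      refine ⟨h40, ?_⟩
      have hfd4 : PySem.Int.floordiv (a : Int) 4 = ((a / 4 : Nat) : Int) := by
        exact_mod_cast PySem.Int.floordiv_natCast a 4
      rw [hfd4] at h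
      replace h : (if (PySem.Int.mod ((a / 4 : Nat) : Int) 4 == 2
            || PySem.Int.mod ((a / 4 : Nat) : Int) 4 == 3) = true
          then pvIsSquarefree ((a / 4 : Nat) : Int) else false) = true := h
      split at h
      · have := pvIsSquarefree_noSq _ h
        rwa [Int.natAbs_natCast] at this
      · exact absurd h (by simp)
    · rw [if_neg (by simp; omega)] at h
      exact absurd h (by simp)

-- the fallback scan of A can never fire when the square part is odd and the kernel is not 1 mod 4
theorem pv_no_fund_divisor (na M S : Nat) (hM : 1 ≤ M) (hS : 1 ≤ S)
    (hEq : na = M * M * S) (hNoSq : pvNoSq S) (hModS : S % 4 ≠ 1) (hModM : M % 2 = 1)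
    (a : Nat) (ha2 : 2 ≤ a) (hadvd : a ∣ na)
    (hsq : ((Nat.sqrt (PySem.Int.floordiv (na : Int) (a : Int)).toNat : Int) *
            (Nat.sqrt (PySem.Int.floordiv (na : Int) (a : Int)).toNat : Int)
            = PySem.Int.floordiv (na : Int) (a : Int)))
    (hfund : pvIsFundamentalDisc (a : Int) = true) : False := by
  have hna1 : 1 ≤ na := by
    have : 1 * 1 * 1 ≤ M * M * S := Nat.mul_le_mul (Nat.mul_le_mul hM hM) hS
    omega
  rw [PySem.Int.floordiv_natCast na a] at hsq
  rw [Int.toNat_natCast] at hsq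
  set f := Nat.sqrt (na / a) with hf
  have hsqNat : f * f = na / a := by exact_mod_cast hsq
  have hnaf : a * (f * f) = na := by rw [hsqNat]; exact Nat.mul_div_cancel' hadvd
  have hfpos : 1 ≤ f := by
    rcases Nat.eq_zero_or_pos f with h0 | h0
    · rw [h0] at hnaf; omega
    · exact h0
  rcases pvIsFundamentalDisc_cases a ha2 hfund with ⟨h4, hNa⟩ | ⟨h4, hNa4⟩
  · have hff : f * f * a = M * M * S := by rw [← hEq, ← hnaf]; ring
    have hfM : f = M := pv_sq_unique f a M S hfpos hM hNa hNoSq hff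
    have haS : a = S := by
      apply Nat.eq_of_mul_eq_mul_left (Nat.mul_pos hM hM)
      calc M * M * a = f * f * a := by rw [hfM]
        _ = M * M * S := hff
    omega
  · have h4dvd : 4 ∣ a := Nat.dvd_of_mod_eq_zero h4
    have e1 : 4 * (a / 4) = a := Nat.mul_div_cancel' h4dvd
    have ha4pos : 1 ≤ a / 4 := by omega
    have hff : (2 * f) * (2 * f) * (a / 4) = M * M * S := by
      calc (2 * f) * (2 * f) * (a / 4) = (4 * (a / 4)) * (f * f) := by ring
        _ = a * (f * f) := by rw [e1]
        _ = na := hnaf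
        _ = M * M * S := hEq
    have := pv_sq_unique (2 * f) (a / 4) M S (by omega) hM hNa4 hNoSq hff
    omega

-- a s²·(0-or-1 mod 4) factorisation of a negative disc forces kernel ≡ 3 (4) or an even square part
theorem pv_negOK_facts (disc : Int) (hneg : disc < 0) (hok : pvNegOK disc)
    (M S : Nat) (hM : 1 ≤ M) (hS : 1 ≤ S) (hEq : disc.natAbs = M * M * S) (hNoSq : pvNoSq S) :
    S % 4 = 3 ∨ M % 2 = 0 := by
  obtain ⟨s, hsmem, hdvd0, hmod⟩ := hok
  have hs1 : 1 ≤ s := (Finset.mem_Icc.mp hsmem).1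
  have hdvd : ((s : Int)) ^ 2 ∣ disc := (PySem.Int.mod_eq_zero_iff_dvd _ _).mp hdvd0
  set t := disc / (s : Int) ^ 2 with htdef
  have hts : disc = (s : Int) ^ 2 * t := (Int.mul_ediv_cancel' hdvd).symm
  have hspos : (0 : Int) < (s : Int) ^ 2 := by positivity
  have htneg : t < 0 := by nlinarith
  obtain ⟨aa, bb, habb, hsf⟩ := Nat.sq_mul_squarefree t.natAbs
  have htpos : 1 ≤ t.natAbs := Int.natAbs_pos.mpr (by omega)
  have haapos : 1 ≤ aa := by
    rcases Nat.eq_zero_or_pos aa with h0 | h0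
    · rw [h0, Nat.mul_zero] at habb; omega
    · exact h0
  have hbbpos : 1 ≤ bb := by
    rcases Nat.eq_zero_or_pos bb with h0 | h0
    · rw [h0] at habb; simp at habb; omega
    · exact h0
  have hnatabs : disc.natAbs = (s * bb) * (s * bb) * aa := by
    rw [hts, Int.natAbs_mul]
    have h1 : ((s : Int) ^ 2).natAbs = s * s := by
      rw [Int.natAbs_pow, Int.natAbs_natCast, sq]
    rw [h1, ← habb]
    ring
  have hsb : s * bb = M :=
    pv_sq_unique (s * bb) aa M S (Nat.mul_pos hs1 hbbpos) hM (pv_squarefree_noSq hsf) hNoSq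
      (by rw [← hnatabs, hEq])
  have haaS : aa = S := by
    apply Nat.eq_of_mul_eq_mul_left (Nat.mul_pos hM hM)
    calc M * M * aa = (s * bb) * (s * bb) * aa := by rw [hsb]
      _ = disc.natAbs := hnatabs.symm
      _ = M * M * S := hEq
  by_cases hbb : bb % 2 = 0
  · right
    obtain ⟨u, hu⟩ := Nat.dvd_of_mod_eq_zero hbb
    have : M = 2 * (s * u) := by rw [← hsb, hu]; ring
    omega
  · have hbodd : bb % 2 = 1 := by omega
    have htnat : t = -((bb * bb * aa : Nat) : Int) := by
      have h1 : t.natAbs = bb * bb * aa := by rw [← habb]; ring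
      omega
    obtain ⟨j, hj⟩ : ∃ j, bb = 2 * j + 1 := ⟨bb / 2, by omega⟩
    rcases hmod with hmod0 | hmod1
    · exfalso
      have h4t : (4 : Int) ∣ t := (PySem.Int.mod_eq_zero_iff_dvd _ _).mp hmod0
      have h4 : 4 ∣ bb * bb * aa := by
        rw [htnat] at h4t
        have h4t' : (4 : Int) ∣ ((bb * bb * aa : Nat) : Int) := dvd_neg.mp h4t
        exact_mod_cast h4t'
      have hcop2 : Nat.Coprime 2 bb :=
        (Nat.Prime.coprime_iff_not_dvd Nat.prime_two).mpr (by omega)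
      have hcop : Nat.Coprime (2 * 2) (bb * bb) :=
        (hcop2.mul_left hcop2).mul_right (hcop2.mul_left hcop2)
      have h4aa : 2 * 2 ∣ aa := hcop.dvd_of_dvd_mul_left (by
        have : (2 * 2 : Nat) = 4 := rfl
        rw [this]
        exact h4)
      exact (pv_squarefree_noSq hsf) 2 (by omega) h4aa
    · left
      have hemod : t % 4 = 1 := by
        rw [← PySem.Int.mod_eq_emod_of_pos (by norm_num)]
        exact hmod1
      have hbbsq : bb * bb = 4 * (j * j + j) + 1 := by rw [hj]; ring
      have hlin : t = 4 * (-(((j * j + j) * aa : Nat) : Int)) + (-(aa : Int)) := by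
        rw [htnat, hbbsq]
        push_cast
        ring
      have haa4 : aa % 4 = 3 := by omega
      omega

theorem pv_main (disc : Int) (hpre : Pre_quadratic_resolvent disc) :
    quadratic_resolvent disc = quadratic_resolvent_alt disc := by
  by_cases hm1 : disc = -1
  · subst hm1
    have e1 : pvFactorize (-1) = PySem.Dict.mk [] := by
      rw [pvFactorize, show ((-1 : Int).natAbs) = 1 from rfl, pvFactAux, dif_neg (by omega)]
      norm_num
    have e2 : pvExtractLoop (-1 : Int).natAbs 2 1 = (1, 1) := by
      rw [show ((-1 : Int).natAbs) = 1 from rfl, pvExtractLoop, dif_neg (by omega)]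
    simp only [quadratic_resolvent, quadratic_resolvent_alt, e1, e2]
    decide
  have hne0 : disc ≠ 0 := by
    rcases hpre with h | h | ⟨h, _⟩ <;> omega
  set na := disc.natAbs with hna
  have hna1 : 1 ≤ na := Int.natAbs_pos.mpr hne0
  obtain ⟨L, hLeq, hLpe, hLprops, hLpair⟩ :=
    pvFactAux_spec (na + 2) na 2 [] (by omega) (by omega) hna1 (by simp)
      (by intro q h2 hq; omega)
  have hfact : pvFactorize disc = PySem.Dict.mk L := by
    rw [pvFactorize, ← hna]
    simpa using hLeq
  have hprimes : ∀ pe ∈ L, Nat.Prime pe.1 := fun pe h => (hLprops pe h).1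
  have hMpos : 0 < pvHalf L := pvHalf_pos L hprimes
  have hSpos : 0 < pvRem L := pvRem_pos L hprimes
  have hMMS : pvHalf L * pvHalf L * pvRem L = na := by rw [← pvPE_eq]; exact hLpe
  have hSnosq : pvNoSq (pvRem L) := pvRem_noSq L hprimes hLpair
  -- B-side loop
  obtain ⟨hB1, hB2, hB3, hB4⟩ :=
    pvExtractLoop_spec (na + 2) na 2 1 (by omega) (by omega) hna1 (by omega)
      (by intro e he hlt; omega)
  have hmB : (pvExtractLoop na 2 1).2 = pvHalf L := by
    apply pv_sq_unique _ (pvExtractLoop na 2 1).1 (pvHalf L) (pvRem L) hB3 hMpos hB2 hSnosq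
    rw [hB1, hMMS]; ring
  have hnB : (pvExtractLoop na 2 1).1 = pvRem L := by
    apply Nat.eq_of_mul_eq_mul_left (Nat.mul_pos hMpos hMpos)
    calc pvHalf L * pvHalf L * (pvExtractLoop na 2 1).1
        = (pvExtractLoop na 2 1).2 * (pvExtractLoop na 2 1).2 * (pvExtractLoop na 2 1).1 := by
          rw [hmB]
      _ = 1 * 1 * na := hB1
      _ = pvHalf L * pvHalf L * pvRem L := by rw [hMMS]; ring
  have hpair : pvExtractLoop na 2 1 = (pvRem L, pvHalf L) := by
    rw [← hmB, ← hnB]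
  -- sign decomposition
  obtain ⟨t, hts, ht⟩ : ∃ t : Int, (t = 1 ∨ t = -1) ∧ disc = t * (na : Int) := by
    rcases Int.natAbs_eq disc with h | h
    · exact ⟨1, Or.inl rfl, by omega⟩
    · exact ⟨-1, Or.inr rfl, by omega⟩
  have htne : t ≠ 0 := by rcases hts with rfl | rfl <;> norm_num
  have hD0ne : t * ((pvRem L : Nat) : Int) ≠ 0 := by
    rcases hts with rfl | rfl <;> · intro hc; simp at hc; omega
  have hMM0 : ((pvHalf L : Nat) : Int) * ((pvHalf L : Nat) : Int) ≠ 0 := by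
    have : (0 : Int) < ((pvHalf L : Nat) : Int) * ((pvHalf L : Nat) : Int) := by
      exact_mod_cast Nat.mul_pos hMpos hMpos
    omega
  have hfactA : disc = (t * ((pvRem L : Nat) : Int)) * (((pvHalf L * pvHalf L : Nat)) : Int) := by
    rw [ht, ← hMMS]; push_cast; ring
  have hfactB : disc = (((pvHalf L : Nat) : Int) * ((pvHalf L : Nat) : Int))
      * (t * ((pvRem L : Nat) : Int)) := by
    rw [ht, ← hMMS]; push_cast; ring
  have hd0B : PySem.Int.floordiv disc (((pvHalf L : Nat) : Int) * ((pvHalf L : Nat) : Int))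
      = t * ((pvRem L : Nat) : Int) := by
    rw [hfactB]
    simp only [PySem.Int.floordiv]
    exact Int.mul_fdiv_cancel_left _ hMM0
  rw [hna] at hpair
  simp only [quadratic_resolvent, quadratic_resolvent_alt, hfact, hpair, hd0B]
  rw [show ((disc, (1 : Int))) = (t * ((pvPE L : Nat) : Int), (1 : Int)) from by rw [hLpe, ht]]
  rw [pvFold_spec L t 1 (fun pe h => by have := (hprimes pe h).two_le; omega)]
  by_cases c1 : PySem.Int.mod (t * ((pvRem L : Nat) : Int)) 4 = 1
  · rw [if_pos c1, if_pos c1]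
    have hdv : PySem.Int.mod disc (t * ((pvRem L : Nat) : Int)) = 0 :=
      (PySem.Int.mod_eq_zero_iff_dvd _ _).mpr ⟨_, hfactA⟩
    rw [if_pos hdv]
    have hfsq : PySem.Int.floordiv disc (t * ((pvRem L : Nat) : Int))
        = ((pvHalf L * pvHalf L : Nat) : Int) := by
      rw [hfactA]
      simp only [PySem.Int.floordiv]
      exact Int.mul_fdiv_cancel_left _ hD0ne
    rw [hfsq]
    rw [show (((pvHalf L * pvHalf L : Nat) : Int)).toNat = pvHalf L * pvHalf L from Int.toNat_natCast _]
    rw [Nat.sqrt_eq]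
    rw [if_pos (by push_cast; ring)]
  · rw [if_neg c1, if_neg c1]
    by_cases c2 : PySem.Int.mod ((pvHalf L : Nat) : Int) 2 = 0
    · rw [if_pos c2]
      have hM2 : pvHalf L % 2 = 0 := by
        have h := PySem.Int.mod_natCast (pvHalf L) 2
        rw [show ((2 : Nat) : Int) = 2 from rfl] at h
        rw [h] at c2
        exact_mod_cast c2
      obtain ⟨k, hk⟩ := Nat.dvd_of_mod_eq_zero hM2
      have hfactA2 : disc = (4 * (t * ((pvRem L : Nat) : Int))) * ((k * k : Nat) : Int) := by
        rw [ht, ← hMMS, hk]; push_cast; ring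
      have h4D0 : (4 : Int) * (t * ((pvRem L : Nat) : Int)) ≠ 0 := by
        intro hc
        rcases mul_eq_zero.mp hc with hc | hc
        · norm_num at hc
        · exact hD0ne hc
      have hdv : PySem.Int.mod disc (4 * (t * ((pvRem L : Nat) : Int))) = 0 :=
        (PySem.Int.mod_eq_zero_iff_dvd _ _).mpr ⟨_, hfactA2⟩
      rw [if_pos hdv]
      have hfsq : PySem.Int.floordiv disc (4 * (t * ((pvRem L : Nat) : Int)))
          = ((k * k : Nat) : Int) := by
        rw [hfactA2]
        simp only [PySem.Int.floordiv]
        exact Int.mul_fdiv_cancel_left _ h4D0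
      rw [hfsq]
      rw [show (((k * k : Nat) : Int)).toNat = k * k from Int.toNat_natCast _]
      rw [Nat.sqrt_eq]
      rw [if_pos (by push_cast; ring)]
      have : PySem.Int.floordiv ((pvHalf L : Nat) : Int) 2 = ((k : Nat) : Int) := by
        rw [show ((2 : Int)) = ((2 : Nat) : Int) from rfl, PySem.Int.floordiv_natCast]
        congr 1
        omega
      rw [this]
    · rw [if_neg c2]
      rw [show ((t * ((pvPE L : Nat) : Int), (1 : Int))) = (disc, (1 : Int)) from by
        rw [hLpe, ← ht]]
      have hM2 : pvHalf L % 2 = 1 := by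
        have h := PySem.Int.mod_natCast (pvHalf L) 2
        rw [show ((2 : Nat) : Int) = 2 from rfl] at h
        rw [h] at c2
        have : ¬ pvHalf L % 2 = 0 := fun hc => c2 (by exact_mod_cast hc)
        omega
      have hnotdvd : ¬ ((4 : Int) * (t * ((pvRem L : Nat) : Int)) ∣ disc) := by
        rintro ⟨q, hq⟩
        rw [hfactB] at hq
        have hMM4 : (((pvHalf L : Nat) : Int) * ((pvHalf L : Nat) : Int)) = 4 * q := by
          apply mul_left_cancel₀ hD0ne
          rw [show (t * ((pvRem L : Nat) : Int)) * (4 * q)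
              = 4 * (t * ((pvRem L : Nat) : Int)) * q from by ring, ← hq]
          ring
        have h4 : (4 : Int) ∣ ((pvHalf L * pvHalf L : Nat) : Int) := ⟨q, by push_cast at hMM4 ⊢; linarith⟩
        have h4n : 4 ∣ pvHalf L * pvHalf L := by exact_mod_cast h4
        obtain ⟨j, hj⟩ : ∃ j, pvHalf L = 2 * j + 1 := ⟨pvHalf L / 2, by omega⟩
        have : pvHalf L * pvHalf L = 4 * (j * j + j) + 1 := by rw [hj]; ring
        omega
      rw [if_neg (fun hc => hnotdvd ((PySem.Int.mod_eq_zero_iff_dvd _ _).mp hc))]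
      apply pvFallback_all_fail
      intro a hmem hlt2
      have hadvd : a ∣ na := pv_mem_divisors disc a ((PySem.List.mem_sorted _ _ _ _).mp hmem)
      by_contra hbool
      have hbool' : ((((PySem.Int.floordiv disc (a : Int)).toNat.sqrt : Int)
            * ((PySem.Int.floordiv disc (a : Int)).toNat.sqrt : Int)
            == PySem.Int.floordiv disc (a : Int))
          && pvIsFundamentalDisc (a : Int)) = true := by
        revert hbool
        cases h : ((((PySem.Int.floordiv disc (a : Int)).toNat.sqrt : Int)
            * ((PySem.Int.floordiv disc (a : Int)).toNat.sqrt : Int)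
            == PySem.Int.floordiv disc (a : Int))
          && pvIsFundamentalDisc (a : Int)) <;> simp
      obtain ⟨hsq', hfund⟩ := Bool.and_eq_true_iff.mp hbool'
      have hsq'' : ((PySem.Int.floordiv disc (a : Int)).toNat.sqrt : Int)
          * ((PySem.Int.floordiv disc (a : Int)).toNat.sqrt : Int)
          = PySem.Int.floordiv disc (a : Int) := by
        exact_mod_cast beq_iff_eq.mp hsq'
      rcases hts with rfl | rfl
      · -- positive disc: the refutation of the brute-force scan
        have hdisc' : disc = ((na : Nat) : Int) := by omega
        have hModS : pvRem L % 4 ≠ 1 := by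
          intro hc
          apply c1
          rw [show ((1 : Int) * ((pvRem L : Nat) : Int)) = (((pvRem L : Nat)) : Int) from by ring]
          have h := PySem.Int.mod_natCast (pvRem L) 4
          rw [show ((4 : Nat) : Int) = 4 from rfl] at h
          rw [h, hc]
          rfl
        rw [hdisc'] at hsq''
        exact pv_no_fund_divisor na (pvHalf L) (pvRem L) hMpos hSpos hMMS.symm hSnosq
          hModS hM2 a (by omega) hadvd hsq'' hfund
      · -- negative disc: Pre_ rules this case out
        exfalso
        have hneg : disc < 0 := by omega
        have hok : pvNegOK disc := by
          rcases hpre with h | h | ⟨_, h⟩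
          · omega
          · exact absurd h hm1
          · exact h
        rcases pv_negOK_facts disc hneg hok (pvHalf L) (pvRem L) hMpos hSpos hMMS.symm hSnosq
          with h3 | h0
        · apply c1
          rw [PySem.Int.mod_eq_emod_of_pos (by norm_num)]
          have hcast : ((pvRem L : Nat) : Int) % 4 = 3 := by
            have h := PySem.Int.mod_natCast (pvRem L) 4
            omega
          omega
        · omega

-- ===== VERDICT (by name: the statement is the Claim_ definition above) =====
theorem quadratic_resolvent_spec : Claim_equal_quadratic_resolvent := by
  intro disc _ hpre
  exact pv_main disc hpre
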